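-- pv_equiv track=rewrite | github.com/jcollera/Decryper | consts.py | generate_list_mask
-- ===== SOURCE A (Python) =====
-- def generate_list_mask(list_obj, count=1):
--     mask = {}
--     for word in list_obj:
--             for letter in word:
--                 if letter not in mask:
--                     mask[letter] = str(count)
--                     count = count + 1
--     return mask
-- ===== SOURCE B (Python) =====
-- def generate_list_mask(list_obj, count=1):
--     chars = ''.join(list_obj)
--     return {c: str(count + len(set(chars[:i])))
--             for i, c in enumerate(chars) if c not in chars[:i]}
-- ===== Notes on version B (the rewrite author's own statement) =====
-- stated objective: alternative
-- what changed: Replaces A's stateful dict-plus-counter accumulation by a stateless per-position rule: a letter is emitted iff it does not occur earlier in the concatenated character stream, with value str(count + len(set(prefix))) computed directly from the prefix instead of a running counter.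
import Mathlib
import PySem

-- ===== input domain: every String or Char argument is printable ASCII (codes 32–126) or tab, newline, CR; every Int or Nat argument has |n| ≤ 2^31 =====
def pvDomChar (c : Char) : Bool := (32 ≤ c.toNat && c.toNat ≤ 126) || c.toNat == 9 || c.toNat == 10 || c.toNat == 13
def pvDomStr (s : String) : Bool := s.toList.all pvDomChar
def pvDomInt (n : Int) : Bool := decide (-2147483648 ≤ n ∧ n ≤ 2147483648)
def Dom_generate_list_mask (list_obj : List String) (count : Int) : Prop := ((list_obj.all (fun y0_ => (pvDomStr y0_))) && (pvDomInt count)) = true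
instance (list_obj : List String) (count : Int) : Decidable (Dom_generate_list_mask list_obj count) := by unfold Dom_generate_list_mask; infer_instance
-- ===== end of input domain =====

-- B replaces A's stateful dict-and-counter loop by a stateless per-position computation:
-- a letter is kept iff it is not in the preceding prefix, numbered count + |set(prefix)| (alternative; same result, quadratic).


-- ===== PORT A =====
-- body of the inner 'for letter in word' loop: 'if letter not in mask: mask[letter] = str(count); count += 1'
def gmStep (st : PySem.Dict String String × Int) (letter : Char) : PySem.Dict String String × Int :=
  if st.1.contains (String.ofList [letter]) = false then
    (st.1.insert (String.ofList [letter]) (PySem.Int.toStr st.2), st.2 + 1)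
  else st

def generate_list_mask (list_obj : List String) (count : Int) : List (String × String) :=
  ((list_obj.foldl (fun st word => word.toList.foldl gmStep st)
      ((PySem.Dict.empty : PySem.Dict String String), count)).1).items

-- ===== PORT B =====
-- ''.join(list_obj) iterated as characters; dict comprehension with the 'c not in chars[:i]' filter
-- and value str(count + len(set(chars[:i]))) — keys are distinct, so the dict is the filtered list in order.
def generate_list_mask_alt (list_obj : List String) (count : Int) : List (String × String) :=
  let chars := list_obj.flatMap (fun w => w.toList)
  (PySem.List.enumerate chars 0).filterMap (fun p =>
    if p.2 ∈ PySem.List.slice chars none (some p.1) then none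
    else some (String.ofList [p.2],
      PySem.Int.toStr (count + PySem.Set.len (PySem.Set.ofList (PySem.List.slice chars none (some p.1))))))

-- ===== PRECONDITION & SPEC =====
def Spec_generate_list_mask (list_obj : List String) (count : Int) (out : List (String × String)) : Prop := out = generate_list_mask_alt list_obj count
instance (list_obj : List String) (count : Int) (out : List (String × String)) : Decidable (Spec_generate_list_mask list_obj count out) := by unfold Spec_generate_list_mask; infer_instance

-- ===== CLAIM (what is proved, stated in full; the proofs are below) =====
def Claim_equal_generate_list_mask : Prop := ∀ (list_obj : List String) (count : Int), Dom_generate_list_mask list_obj count → Spec_generate_list_mask list_obj count (generate_list_mask list_obj count)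

-- ===== LEMMAS AND PROOFS =====

-- The state of A's loop after processing the character sequence `pref`.
def maskState (count : Int) (pref : List Char) : PySem.Dict String String × Int :=
  (PySem.Dict.mk ((PySem.List.enumerate (PySem.List.dedup pref) 0).map
      (fun p => (String.ofList [p.2], PySem.Int.toStr (count + p.1)))),
   count + (PySem.List.dedup pref).length)

theorem contains_aux (count : Int) (l : List Char) (s : Int) (c : Char) :
    ((PySem.List.enumerate l s).map (fun p => (String.ofList [p.2], PySem.Int.toStr (count + p.1)))).any
      (fun p => p.1 == String.ofList [c]) = decide (c ∈ l) := by
  induction l generalizing s with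
  | nil => simp [PySem.List.enumerate_nil]
  | cons x t ih =>
    have hbeq : (String.ofList [x] == String.ofList [c]) = decide (c = x) := by
      by_cases hxc : c = x
      · simp [hxc]
      · have hcx : ¬ (x = c) := fun hh => hxc hh.symm
        simp [String.ext_iff, hxc, hcx]
    simp [PySem.List.enumerate_cons, ih, hbeq]

theorem contains_maskState (count : Int) (pref : List Char) (c : Char) :
    (maskState count pref).1.contains (String.ofList [c]) = decide (c ∈ PySem.List.dedup pref) := by
  simp only [maskState, PySem.Dict.contains]
  exact contains_aux count (PySem.List.dedup pref) 0 c

theorem dedup_append_singleton {α : Type} [BEq α] [LawfulBEq α] (xs : List α) (c : α) :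
    PySem.List.dedup (xs ++ [c]) =
      (if c ∈ PySem.List.dedup xs then PySem.List.dedup xs else PySem.List.dedup xs ++ [c]) := by
  simp only [PySem.List.dedup, PySem.Set.ofList_eq_foldl, List.foldl_append, List.foldl_cons,
    List.foldl_nil]
  rw [← PySem.Set.ofList_eq_foldl]
  simp [PySem.Set.add, PySem.Set.contains]

theorem gmStep_maskState (count : Int) (pref : List Char) (c : Char) :
    gmStep (maskState count pref) c = maskState count (pref ++ [c]) := by
  by_cases h : c ∈ pref
  · have hm : c ∈ PySem.List.dedup pref := by rw [PySem.List.mem_dedup]; exact h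
    have hc : (maskState count pref).1.contains (String.ofList [c]) = true := by
      rw [contains_maskState, decide_eq_true_eq]; exact hm
    have hd : PySem.List.dedup (pref ++ [c]) = PySem.List.dedup pref := by
      rw [dedup_append_singleton, if_pos hm]
    simp only [gmStep, hc]
    rw [if_neg (by decide)]
    unfold maskState
    rw [hd]
  · have hm : c ∉ PySem.List.dedup pref := by rw [PySem.List.mem_dedup]; exact h
    have hc : (maskState count pref).1.contains (String.ofList [c]) = false := by
      rw [contains_maskState, decide_eq_false_iff_not]; exact hm
    have hd : PySem.List.dedup (pref ++ [c]) = PySem.List.dedup pref ++ [c] := by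
      rw [dedup_append_singleton, if_neg hm]
    simp only [gmStep, hc]
    apply Prod.ext
    · show (maskState count pref).1.insert (String.ofList [c])
          (PySem.Int.toStr (maskState count pref).2) = (maskState count (pref ++ [c])).1
      rw [PySem.Dict.insert, if_neg (by simp [hc])]
      apply PySem.Dict.ext
      simp only [maskState, hd, PySem.List.enumerate_append, List.map_append,
        PySem.List.enumerate_cons, PySem.List.enumerate_nil, List.map_cons, List.map_nil, zero_add]
    · show (maskState count pref).2 + 1 = (maskState count (pref ++ [c])).2
      simp only [maskState, hd, List.length_append, List.length_cons, List.length_nil]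
      push_cast
      ring

theorem foldl_gmStep_maskState (cs : List Char) (pref : List Char) (count : Int) :
    cs.foldl gmStep (maskState count pref) = maskState count (pref ++ cs) := by
  induction cs generalizing pref with
  | nil => rw [List.foldl_nil, List.append_nil]
  | cons c t ih =>
    rw [List.foldl_cons, gmStep_maskState, ih, List.append_assoc]; rfl

theorem foldl_words_eq_flat (ws : List String) (st : PySem.Dict String String × Int) :
    ws.foldl (fun st word => word.toList.foldl gmStep st) st
      = (ws.flatMap (fun word => word.toList)).foldl gmStep st := by
  induction ws generalizing st with
  | nil => rfl
  | cons w t ih => rw [List.foldl_cons, ih, List.flatMap_cons, List.foldl_append]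

theorem maskState_nil (count : Int) :
    maskState count [] = ((PySem.Dict.empty : PySem.Dict String String), count) := by
  unfold maskState
  rw [show PySem.List.dedup ([] : List Char) = [] from rfl]
  simp only [PySem.List.enumerate_nil, List.map_nil, List.length_nil, Nat.cast_zero, add_zero]
  rfl

-- B's per-position filterMap over the whole char list equals A's enumerate-over-dedup map.
theorem bmain (count : Int) (chars : List Char) :
    (PySem.List.enumerate chars 0).filterMap (fun p =>
        if p.2 ∈ PySem.List.slice chars none (some p.1) then none
        else some (String.ofList [p.2],
          PySem.Int.toStr (count + PySem.Set.len (PySem.Set.ofList (PySem.List.slice chars none (some p.1))))))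
      = (PySem.List.enumerate (PySem.List.dedup chars) 0).map
          (fun p => (String.ofList [p.2], PySem.Int.toStr (count + p.1))) := by
  induction chars using List.reverseRecOn with
  | nil => simp [PySem.List.enumerate_nil]
  | append_singleton xs c ih =>
    rw [PySem.List.enumerate_append, List.filterMap_append]
    have hcongr : (PySem.List.enumerate xs 0).filterMap (fun p =>
        if p.2 ∈ PySem.List.slice (xs ++ [c]) none (some p.1) then none
        else some (String.ofList [p.2],
          PySem.Int.toStr (count + PySem.Set.len (PySem.Set.ofList (PySem.List.slice (xs ++ [c]) none (some p.1))))))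
        = (PySem.List.enumerate xs 0).filterMap (fun p =>
        if p.2 ∈ PySem.List.slice xs none (some p.1) then none
        else some (String.ofList [p.2],
          PySem.Int.toStr (count + PySem.Set.len (PySem.Set.ofList (PySem.List.slice xs none (some p.1)))))) := by
      apply List.filterMap_congr
      intro p hp
      rw [PySem.List.mem_enumerate_iff] at hp
      obtain ⟨k, hk, rfl⟩ := hp
      have hs : PySem.List.slice (xs ++ [c]) none (some ((0:Int) + k)) =
          PySem.List.slice xs none (some ((0:Int) + k)) := by
        rw [show ((0:Int) + k) = (k : Int) by ring]
        rw [PySem.List.slice_to_natCast, PySem.List.slice_to_natCast]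
        rw [List.take_append_of_le_length (le_of_lt hk)]
      rw [hs]
    rw [hcongr, ih]
    have hlast : PySem.List.slice (xs ++ [c]) none (some ((0:Int) + xs.length)) = xs := by
      rw [show ((0:Int) + xs.length) = ((xs.length : Nat) : Int) by ring]
      rw [PySem.List.slice_to_natCast]
      exact List.take_left
    rw [dedup_append_singleton]
    by_cases h : c ∈ PySem.List.dedup xs
    · have hcx : c ∈ xs := (PySem.List.mem_dedup xs c).1 h
      rw [if_pos h]
      simp [PySem.List.enumerate_cons, PySem.List.enumerate_nil, hcx]
    · have hcx : c ∉ xs := fun hx => h ((PySem.List.mem_dedup xs c).2 hx)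
      rw [if_neg h]
      rw [PySem.List.enumerate_append, List.map_append]
      simp only [PySem.List.enumerate_cons, PySem.List.enumerate_nil, List.filterMap_cons,
        List.filterMap_nil, List.map_cons, List.map_nil, hlast]
      rw [if_neg hcx]
      simp

-- ===== VERDICT (by name: the statement is the Claim_ definition above) =====
theorem generate_list_mask_spec : Claim_equal_generate_list_mask := by
  intro list_obj count _
  show generate_list_mask list_obj count = generate_list_mask_alt list_obj count
  unfold generate_list_mask generate_list_mask_alt
  rw [foldl_words_eq_flat, ← maskState_nil count, foldl_gmStep_maskState, bmain]
  rfl
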